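-- pv_equiv track=rewrite | github.com/yeeshue99/Daily-Coding | CoolFeature.py | coolFeature
-- ===== SOURCE A (Python) =====
-- from itertools import product
--
-- def coolFeature(a, b, query):
--     queries = []
--     for q in query:
--         if len(q) == 3:
--             b[q[1]] = q[2]
--
--         elif len(q) == 2:
--             c = product(a, b)
--             queryAdd = 0
--             for comb in c:
--                 if sum(comb) == q[1]:
--                     queryAdd += 1
--             queries.append(queryAdd)
--     return queries
-- ===== SOURCE B (Python) =====
-- from collections import Counter
--
--
-- def coolFeature(a, b, query):
--     # Maintain a Counter of the current contents of b across update queries;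
--     # a count query is answered by looking up cnt[target - x] for each x in a,
--     # instead of scanning every (x, y) pair of a x b as A does.
--     cnt = Counter(b)
--     out = []
--     for q in query:
--         if len(q) == 3:
--             i, v = q[1], q[2]
--             cnt[b[i]] -= 1
--             b[i] = v
--             cnt[v] += 1
--         elif len(q) == 2:
--             t = q[1]
--             out.append(sum(cnt[t - x] for x in a))
--     return out
-- ===== Notes on version B (the rewrite author's own statement) =====
-- stated objective: alternative
-- what changed: B maintains a Counter of b (kept in sync on update queries) and answers each count query by summing cnt[target - a_i] over a, instead of A's full itertools.product scan over a x b per count query.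
import Mathlib
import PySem

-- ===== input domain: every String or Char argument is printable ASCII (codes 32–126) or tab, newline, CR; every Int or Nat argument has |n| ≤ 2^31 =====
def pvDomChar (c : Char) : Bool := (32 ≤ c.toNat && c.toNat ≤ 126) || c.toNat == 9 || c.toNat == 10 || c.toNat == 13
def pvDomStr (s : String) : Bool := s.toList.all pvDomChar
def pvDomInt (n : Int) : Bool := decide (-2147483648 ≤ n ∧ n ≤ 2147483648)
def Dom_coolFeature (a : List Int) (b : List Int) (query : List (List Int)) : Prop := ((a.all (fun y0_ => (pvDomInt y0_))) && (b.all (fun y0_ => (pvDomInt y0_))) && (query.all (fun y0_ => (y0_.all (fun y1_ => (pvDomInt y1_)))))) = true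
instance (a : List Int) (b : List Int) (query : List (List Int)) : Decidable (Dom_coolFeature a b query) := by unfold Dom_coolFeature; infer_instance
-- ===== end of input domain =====

-- B replaces A's per-count-query full scan of itertools.product(a, b) by a Counter of b
-- kept in sync across update queries, answering each count query as the sum of
-- cnt[target - x] over x in a (objective: alternative algorithm). Both A and B mutate the
-- argument list b identically in Python; the equivalence proved here is about the return value.


-- ===== PORT A =====
-- itertools.product(a, b) as a list of pairs (a outer, b inner)
def pvProd (a b : List Int) : List (Int × Int) :=
  a.flatMap (fun x => b.map (fun y => (x, y)))

-- the inner 'for comb in c: if sum(comb) == q[1]: queryAdd += 1' loop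
def pvCountLoop (c : List (Int × Int)) (t : Int) : Int :=
  c.foldl (fun queryAdd comb => if comb.1 + comb.2 = t then queryAdd + 1 else queryAdd) 0

def coolFeature (a : List Int) (b : List Int) (query : List (List Int)) : List Int :=
  (query.foldl (fun (st : List Int × List Int) q =>
      if q.length = 3 then
        (PySem.List.pySetD st.1 (PySem.List.pyGetD q 1 0) (PySem.List.pyGetD q 2 0), st.2)
      else if q.length = 2 then
        (st.1, st.2 ++ [pvCountLoop (pvProd a st.1) (PySem.List.pyGetD q 1 0)])
      else st)
    (b, [])).2

-- ===== PORT B =====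
def coolFeature_alt (a : List Int) (b : List Int) (query : List (List Int)) : List Int :=
  (query.foldl (fun (st : List Int × PySem.Dict Int Int × List Int) q =>
      if q.length = 3 then
        let i := PySem.List.pyGetD q 1 0
        let v := PySem.List.pyGetD q 2 0
        let cnt1 := st.2.1.modify (PySem.List.pyGetD st.1 i 0) 0 (· - 1)
        (PySem.List.pySetD st.1 i v, cnt1.modify v 0 (· + 1), st.2.2)
      else if q.length = 2 then
        let t := PySem.List.pyGetD q 1 0
        (st.1, st.2.1, st.2.2 ++ [(a.map (fun x => st.2.1.getD (t - x) 0)).sum])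
      else st)
    (b, PySem.Dict.counter b, [])).2.2

-- ===== PRECONDITION & SPEC =====
-- Pre_ excludes exactly the inputs where Python A raises IndexError: an update query
-- ([_, i, v]) whose index i is out of range for b (b's length never changes).
def Pre_coolFeature (a : List Int) (b : List Int) (query : List (List Int)) : Prop :=
  ∀ q ∈ query, q.length = 3 → PySem.Raise.InRange b.length (PySem.List.pyGetD q 1 0)
instance (a : List Int) (b : List Int) (query : List (List Int)) : Decidable (Pre_coolFeature a b query) := by unfold Pre_coolFeature; infer_instance
def pvWitness_coolFeature : List Int × List Int × List (List Int) :=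
  ([1, 2], [3, 4], [[1, 5], [1, 0, 7], [1, 8]])

def Spec_coolFeature (a : List Int) (b : List Int) (query : List (List Int)) (out : List Int) : Prop := out = coolFeature_alt a b query
instance (a : List Int) (b : List Int) (query : List (List Int)) (out : List Int) : Decidable (Spec_coolFeature a b query out) := by unfold Spec_coolFeature; infer_instance

-- ===== CLAIM (what is proved, stated in full; the proofs are below) =====
def Claim_equal_coolFeature : Prop := ∀ (a : List Int) (b : List Int) (query : List (List Int)), Dom_coolFeature a b query → Pre_coolFeature a b query → Spec_coolFeature a b query (coolFeature a b query)

-- ===== LEMMAS AND PROOFS =====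

-- normalized (Nat) index of a Python index i into a list of length n
def pvNIdx (n : Nat) (i : Int) : Nat := if 0 ≤ i then i.toNat else n - (-i).toNat

theorem pvNIdx_lt {n : Nat} {i : Int} (h : PySem.Raise.InRange n i) : pvNIdx n i < n := by
  simp [PySem.Raise.InRange] at h
  unfold pvNIdx
  split_ifs <;> omega

theorem pySetD_eq_set {xs : List Int} {i : Int} (h : PySem.Raise.InRange xs.length i) (v : Int) :
    PySem.List.pySetD xs i v = xs.set (pvNIdx xs.length i) v := by
  simp [PySem.Raise.InRange] at h
  simp [PySem.List.pySetD, PySem.List.pySet?, PySem.List.pyIdx?, pvNIdx]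
  split_ifs <;> simp_all

theorem pyGetD_eq_getD {xs : List Int} {i : Int} (h : PySem.Raise.InRange xs.length i) (d : Int) :
    PySem.List.pyGetD xs i d = xs.getD (pvNIdx xs.length i) d := by
  simp [PySem.Raise.InRange] at h
  simp [PySem.List.pyGetD, PySem.List.pyGet?, PySem.List.pyIdx?, pvNIdx]
  split_ifs <;> simp_all

-- counting in a list after a single set
theorem count_set (xs : List Int) (j : Nat) (hj : j < xs.length) (v k : Int) :
    ((xs.set j v).count k : Int)
      = (xs.count k : Int) - (if xs.getD j 0 = k then 1 else 0) + (if v = k then 1 else 0) := by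
  induction xs generalizing j with
  | nil => simp at hj
  | cons x xs ih =>
    cases j with
    | zero =>
      simp only [List.set_cons_zero, List.count_cons, List.getD_cons_zero, beq_iff_eq]
      push_cast
      split_ifs <;> omega
    | succ n =>
      simp only [List.set_cons_succ, List.count_cons, List.getD_cons_succ]
      have := ih n (by simpa using hj)
      push_cast
      split_ifs at * <;> omega

-- one pass of the product loop over the pairs attached to a single x of a
theorem pvInnerLoop_eq (x t : Int) (b : List Int) (init : Int) :
    ((b.map (fun y => (x, y))).foldl
        (fun queryAdd comb => if comb.1 + comb.2 = t then queryAdd + 1 else queryAdd) init)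
      = init + (b.count (t - x) : Int) := by
  induction b generalizing init with
  | nil => simp
  | cons y ys ih =>
    simp only [List.map_cons, List.foldl_cons, List.count_cons, ih]
    push_cast
    split_ifs <;> simp_all <;> omega

-- the inner product loop counts, per element x of a, the occurrences of (t - x) in b
theorem pvCountLoop_eq (a b : List Int) (t : Int) :
    pvCountLoop (pvProd a b) t = (a.map (fun x => (b.count (t - x) : Int))).sum := by
  suffices h : ∀ init : Int,
      ((pvProd a b).foldl
          (fun queryAdd comb => if comb.1 + comb.2 = t then queryAdd + 1 else queryAdd) init)
        = init + (a.map (fun x => (b.count (t - x) : Int))).sum by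
    simpa [pvCountLoop] using h 0
  induction a with
  | nil => simp [pvProd]
  | cons x xs ih =>
    intro init
    simp only [pvProd, List.flatMap_cons, List.foldl_append, List.map_cons, List.sum_cons]
    rw [pvInnerLoop_eq]
    rw [show xs.flatMap (fun x => b.map (fun y => (x, y))) = pvProd xs b from rfl, ih]
    ring

-- main invariant: the two folds agree given cnt counts bcur
theorem fold_invariant (a : List Int) (n : Nat) :
    ∀ (qs : List (List Int)) (bcur : List Int) (cnt : PySem.Dict Int Int) (out : List Int),
      bcur.length = n →
      (∀ q ∈ qs, q.length = 3 → PySem.Raise.InRange n (PySem.List.pyGetD q 1 0)) →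
      (∀ k, cnt.getD k 0 = (bcur.count k : Int)) →
      (qs.foldl (fun (st : List Int × List Int) q =>
          if q.length = 3 then
            (PySem.List.pySetD st.1 (PySem.List.pyGetD q 1 0) (PySem.List.pyGetD q 2 0), st.2)
          else if q.length = 2 then
            (st.1, st.2 ++ [pvCountLoop (pvProd a st.1) (PySem.List.pyGetD q 1 0)])
          else st) (bcur, out)).2
      = (qs.foldl (fun (st : List Int × PySem.Dict Int Int × List Int) q =>
          if q.length = 3 then
            let i := PySem.List.pyGetD q 1 0
            let v := PySem.List.pyGetD q 2 0
            let cnt1 := st.2.1.modify (PySem.List.pyGetD st.1 i 0) 0 (· - 1)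
            (PySem.List.pySetD st.1 i v, cnt1.modify v 0 (· + 1), st.2.2)
          else if q.length = 2 then
            let t := PySem.List.pyGetD q 1 0
            (st.1, st.2.1, st.2.2 ++ [(a.map (fun x => st.2.1.getD (t - x) 0)).sum])
          else st) (bcur, cnt, out)).2.2 := by
  intro qs
  induction qs with
  | nil => intro bcur cnt out _ _ _; rfl
  | cons q qs ih =>
    intro bcur cnt out hlen hpre hcnt
    by_cases hq3 : q.length = 3
    · have hin : PySem.Raise.InRange bcur.length (PySem.List.pyGetD q 1 0) := by
        rw [hlen]; exact hpre q (List.mem_cons_self) hq3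
      have hj := pvNIdx_lt hin
      simp only [List.foldl_cons, hq3, if_pos]
      rw [pySetD_eq_set hin, pyGetD_eq_getD hin]
      apply ih
      · simpa using hlen
      · exact fun q' hq' => hpre q' (List.mem_cons_of_mem _ hq')
      · intro k
        have hset := count_set bcur (pvNIdx bcur.length (PySem.List.pyGetD q 1 0)) hj
          (PySem.List.pyGetD q 2 0) k
        simp only [PySem.Dict.getD_modify, hcnt, hset]
        clear hset hcnt hpre hlen hin ih
        split_ifs <;> simp_all
    · by_cases hq2 : q.length = 2
      · simp only [List.foldl_cons, hq2, if_pos]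
        have hcq : pvCountLoop (pvProd a bcur) (PySem.List.pyGetD q 1 0)
            = (a.map (fun x => cnt.getD (PySem.List.pyGetD q 1 0 - x) 0)).sum := by
          rw [pvCountLoop_eq]
          congr 1
          exact List.map_congr_left fun x _ => (hcnt _).symm
        rw [hcq]
        exact ih _ _ _ hlen (fun q' hq' => hpre q' (List.mem_cons_of_mem _ hq')) hcnt
      · simp only [List.foldl_cons, hq3, hq2]
        exact ih _ _ _ hlen (fun q' hq' => hpre q' (List.mem_cons_of_mem _ hq')) hcnt

-- ===== VERDICT (by name: the statement is the Claim_ definition above) =====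
theorem coolFeature_spec : Claim_equal_coolFeature := by
  intro a b query _ hpre
  unfold Spec_coolFeature coolFeature coolFeature_alt
  exact fold_invariant a b.length query b (PySem.Dict.counter b) [] rfl hpre
    (fun k => by simp [PySem.Dict.getD_counter])
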